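-- pv_equiv track=rewrite | github.com/satusdev/bedrock-forge | forge/api/routes/admin/servers.py | parse_bedrock_env
-- ===== SOURCE A (Python) =====
-- def parse_bedrock_env(env_content: str) -> dict:
--     """Parse Bedrock .env file content and extract environment variables."""
--     result = {
--         "db_name": None,
--         "db_user": None,
--         "db_password": None,
--         "db_host": "localhost",
--         "wp_home": None,
--         "wp_siteurl": None,
--         "wp_env": "production",
--         "table_prefix": "wp_"
--     }
--
--     key_mapping = {
--         "DB_NAME": "db_name",
--         "DB_USER": "db_user",
--         "DB_PASSWORD": "db_password",
--         "DB_HOST": "db_host",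
--         "WP_HOME": "wp_home",
--         "WP_SITEURL": "wp_siteurl",
--         "WP_ENV": "wp_env",
--         "TABLE_PREFIX": "table_prefix"
--     }
--
--     for line in env_content.split('\n'):
--         line = line.strip()
--         # Skip comments and empty lines
--         if not line or line.startswith('#'):
--             continue
--         # Parse KEY=value format
--         if '=' in line:
--             key, _, value = line.partition('=')
--             key = key.strip()
--             value = value.strip()
--             # Remove quotes from value
--             if (value.startswith('"') and value.endswith('"')) or \
--                (value.startswith("'") and value.endswith("'")):
--                 value = value[1:-1]
--             # Map to result dict
--             if key in key_mapping:
--                 result[key_mapping[key]] = value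
--
--     return result
-- ===== SOURCE B (Python) =====
-- def parse_bedrock_env(env_content: str) -> dict:
--     """Parse Bedrock .env file content and extract environment variables."""
--     # First collect every parsed KEY=value pair in order, then answer each
--     # target key by scanning the pairs back-to-front for its source key.
--     parsed = []
--     for raw in env_content.split('\n'):
--         line = raw.strip()
--         if line and not line.startswith('#') and '=' in line:
--             key, _, value = line.partition('=')
--             value = value.strip()
--             if (value.startswith('"') and value.endswith('"')) or \
--                (value.startswith("'") and value.endswith("'")):
--                 value = value[1:-1]
--             parsed.append((key.strip(), value))
--
--     def last(src, default):
--         for k, v in reversed(parsed):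
--             if k == src:
--                 return v
--         return default
--
--     return {
--         "db_name": last("DB_NAME", None),
--         "db_user": last("DB_USER", None),
--         "db_password": last("DB_PASSWORD", None),
--         "db_host": last("DB_HOST", "localhost"),
--         "wp_home": last("WP_HOME", None),
--         "wp_siteurl": last("WP_SITEURL", None),
--         "wp_env": last("WP_ENV", "production"),
--         "table_prefix": last("TABLE_PREFIX", "wp_"),
--     }
-- ===== Notes on version B (the rewrite author's own statement) =====
-- stated objective: alternative
-- what changed: A maps each line into the result dict while parsing; B first collects all parsed KEY=value pairs into a list, then fills each of the eight fixed result keys by a back-to-front scan of that list, using no dict during parsing.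
import Mathlib
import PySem

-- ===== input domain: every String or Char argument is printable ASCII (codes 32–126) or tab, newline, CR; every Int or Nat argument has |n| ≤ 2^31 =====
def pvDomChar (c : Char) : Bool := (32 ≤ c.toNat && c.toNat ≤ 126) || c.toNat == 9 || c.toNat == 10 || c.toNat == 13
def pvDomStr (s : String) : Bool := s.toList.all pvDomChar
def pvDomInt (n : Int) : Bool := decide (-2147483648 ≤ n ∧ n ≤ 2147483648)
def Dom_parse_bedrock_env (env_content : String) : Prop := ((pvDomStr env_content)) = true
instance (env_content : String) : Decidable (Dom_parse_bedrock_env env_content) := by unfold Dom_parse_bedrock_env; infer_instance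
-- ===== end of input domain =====

-- B replaces A's map-while-parsing loop by a collect-pairs pass followed by a
-- per-target back-to-front scan (no dict during parsing); objective: alternative decomposition.

-- ===== PORT A =====

-- line.partition('=') restricted to (before, after); exact because A only calls it when '=' ∈ line
def pvPartitionEqA (line : String) : String × String :=
  (String.ofList (line.toList.takeWhile (· ≠ '=')),
   String.ofList ((line.toList.dropWhile (· ≠ '=')).drop 1))

def pvKeyMappingA : PySem.Dict String String :=
  PySem.Dict.ofList [("DB_NAME", "db_name"), ("DB_USER", "db_user"),
    ("DB_PASSWORD", "db_password"), ("DB_HOST", "db_host"), ("WP_HOME", "wp_home"),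
    ("WP_SITEURL", "wp_siteurl"), ("WP_ENV", "wp_env"), ("TABLE_PREFIX", "table_prefix")]

def pvStepA (result : PySem.Dict String (Option String)) (line0 : String) :
    PySem.Dict String (Option String) :=
  let line := PySem.Str.strip line0
  if line == "" || PySem.Str.startswith line "#" then result
  else if PySem.Str.isIn "=" line then
    let kv := pvPartitionEqA line
    let key := PySem.Str.strip kv.1
    let value := PySem.Str.strip kv.2
    let value :=
      if (PySem.Str.startswith value "\"" && PySem.Str.endswith value "\"") ||
         (PySem.Str.startswith value "'" && PySem.Str.endswith value "'") then
        PySem.Str.slice value (some 1) (some (-1))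
      else value
    match PySem.Dict.get? pvKeyMappingA key with
    | some tgt => result.insert tgt (some value)
    | none => result
  else result

def parse_bedrock_env (env_content : String) : List (String × Option String) :=
  let init : PySem.Dict String (Option String) :=
    PySem.Dict.ofList [("db_name", none), ("db_user", none), ("db_password", none),
      ("db_host", some "localhost"), ("wp_home", none), ("wp_siteurl", none),
      ("wp_env", some "production"), ("table_prefix", some "wp_")]
  ((((PySem.Str.split? env_content "\n").getD []).foldl pvStepA init)).items

-- ===== PORT B =====

def pvParseLineB (raw : String) : Option (String × String) :=
  let line := PySem.Str.strip raw
  if !(line == "") && !PySem.Str.startswith line "#" && PySem.Str.isIn "=" line then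
    let kv := pvPartitionEqA line
    let value := PySem.Str.strip kv.2
    let value :=
      if (PySem.Str.startswith value "\"" && PySem.Str.endswith value "\"") ||
         (PySem.Str.startswith value "'" && PySem.Str.endswith value "'") then
        PySem.Str.slice value (some 1) (some (-1))
      else value
    some (PySem.Str.strip kv.1, value)
  else none

-- last(src, default): first match scanning parsed back-to-front
def pvLastB (parsed : List (String × String)) (src : String) (dflt : Option String) :
    Option String :=
  match parsed.reverse.find? (fun p => p.1 == src) with
  | some p => some p.2
  | none => dflt

def parse_bedrock_env_alt (env_content : String) : List (String × Option String) :=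
  let parsed := ((PySem.Str.split? env_content "\n").getD []).filterMap pvParseLineB
  [("db_name", pvLastB parsed "DB_NAME" none),
   ("db_user", pvLastB parsed "DB_USER" none),
   ("db_password", pvLastB parsed "DB_PASSWORD" none),
   ("db_host", pvLastB parsed "DB_HOST" (some "localhost")),
   ("wp_home", pvLastB parsed "WP_HOME" none),
   ("wp_siteurl", pvLastB parsed "WP_SITEURL" none),
   ("wp_env", pvLastB parsed "WP_ENV" (some "production")),
   ("table_prefix", pvLastB parsed "TABLE_PREFIX" (some "wp_"))]

-- ===== PRECONDITION & SPEC =====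
def Spec_parse_bedrock_env (env_content : String) (out : List (String × Option String)) : Prop := out = parse_bedrock_env_alt env_content
instance (env_content : String) (out : List (String × Option String)) : Decidable (Spec_parse_bedrock_env env_content out) := by unfold Spec_parse_bedrock_env; infer_instance

-- ===== CLAIM (what is proved, stated in full; the proofs are below) =====
def Claim_equal_parse_bedrock_env : Prop := ∀ (env_content : String), Dom_parse_bedrock_env env_content → Spec_parse_bedrock_env env_content (parse_bedrock_env env_content)

-- ===== LEMMAS AND PROOFS =====

-- the 8-slot result dict with variable values
def pvMk (a1 a2 a3 a4 a5 a6 a7 a8 : Option String) : PySem.Dict String (Option String) :=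
  PySem.Dict.mk [("db_name", a1), ("db_user", a2), ("db_password", a3), ("db_host", a4),
    ("wp_home", a5), ("wp_siteurl", a6), ("wp_env", a7), ("table_prefix", a8)]

theorem pvLastB_cons (k v : String) (ps : List (String × String)) (src : String)
    (dflt : Option String) :
    pvLastB ((k, v) :: ps) src dflt = pvLastB ps src (if k == src then some v else dflt) := by
  simp only [pvLastB, List.reverse_cons, List.find?_append]
  cases h : (ps.reverse.find? (fun p => p.1 == src)) with
  | some p => simp
  | none => by_cases hk : (k == src) = true <;> simp [List.find?, hk]

theorem pvStepA_of_parse_none (d : PySem.Dict String (Option String)) (l : String)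
    (h : pvParseLineB l = none) : pvStepA d l = d := by
  unfold pvStepA
  unfold pvParseLineB at h
  by_cases h1 : (PySem.Str.strip l == "") = true <;>
  by_cases h2 : PySem.Str.startswith (PySem.Str.strip l) "#" = true <;>
  by_cases h3 : PySem.Str.isIn "=" (PySem.Str.strip l) = true <;>
    simp_all

theorem pvStepA_of_parse_some (d : PySem.Dict String (Option String)) (l : String)
    (k v : String) (h : pvParseLineB l = some (k, v)) :
    pvStepA d l =
      match PySem.Dict.get? pvKeyMappingA k with
      | some tgt => d.insert tgt (some v)
      | none => d := by
  unfold pvStepA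
  unfold pvParseLineB at h
  by_cases h1 : (PySem.Str.strip l == "") = true <;>
  by_cases h2 : PySem.Str.startswith (PySem.Str.strip l) "#" = true <;>
  by_cases h3 : PySem.Str.isIn "=" (PySem.Str.strip l) = true <;>
    simp_all

-- how one parsed pair updates the 8 slots
theorem pvKeyMappingA_eq : pvKeyMappingA = PySem.Dict.mk
    [("DB_NAME", "db_name"), ("DB_USER", "db_user"), ("DB_PASSWORD", "db_password"),
     ("DB_HOST", "db_host"), ("WP_HOME", "wp_home"), ("WP_SITEURL", "wp_siteurl"),
     ("WP_ENV", "wp_env"), ("TABLE_PREFIX", "table_prefix")] := by decide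

theorem pvStepA_mk (a1 a2 a3 a4 a5 a6 a7 a8 : Option String) (l k v : String)
    (h : pvParseLineB l = some (k, v)) :
    pvStepA (pvMk a1 a2 a3 a4 a5 a6 a7 a8) l =
      pvMk (if k == "DB_NAME" then some v else a1) (if k == "DB_USER" then some v else a2)
        (if k == "DB_PASSWORD" then some v else a3) (if k == "DB_HOST" then some v else a4)
        (if k == "WP_HOME" then some v else a5) (if k == "WP_SITEURL" then some v else a6)
        (if k == "WP_ENV" then some v else a7) (if k == "TABLE_PREFIX" then some v else a8) := by
  rw [pvStepA_of_parse_some _ l k v h]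
  by_cases h1 : k = "DB_NAME"; · subst h1; simp [pvKeyMappingA_eq, pvMk, PySem.Dict.get?, PySem.Dict.insert, PySem.Dict.contains]
  by_cases h2 : k = "DB_USER"; · subst h2; simp [pvKeyMappingA_eq, pvMk, PySem.Dict.get?, PySem.Dict.insert, PySem.Dict.contains]
  by_cases h3 : k = "DB_PASSWORD"; · subst h3; simp [pvKeyMappingA_eq, pvMk, PySem.Dict.get?, PySem.Dict.insert, PySem.Dict.contains]
  by_cases h4 : k = "DB_HOST"; · subst h4; simp [pvKeyMappingA_eq, pvMk, PySem.Dict.get?, PySem.Dict.insert, PySem.Dict.contains]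
  by_cases h5 : k = "WP_HOME"; · subst h5; simp [pvKeyMappingA_eq, pvMk, PySem.Dict.get?, PySem.Dict.insert, PySem.Dict.contains]
  by_cases h6 : k = "WP_SITEURL"; · subst h6; simp [pvKeyMappingA_eq, pvMk, PySem.Dict.get?, PySem.Dict.insert, PySem.Dict.contains]
  by_cases h7 : k = "WP_ENV"; · subst h7; simp [pvKeyMappingA_eq, pvMk, PySem.Dict.get?, PySem.Dict.insert, PySem.Dict.contains]
  by_cases h8 : k = "TABLE_PREFIX"; · subst h8; simp [pvKeyMappingA_eq, pvMk, PySem.Dict.get?, PySem.Dict.insert, PySem.Dict.contains]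
  have n1 : ("DB_NAME" == k) = false := by simp [Ne.symm h1]
  have n2 : ("DB_USER" == k) = false := by simp [Ne.symm h2]
  have n3 : ("DB_PASSWORD" == k) = false := by simp [Ne.symm h3]
  have n4 : ("DB_HOST" == k) = false := by simp [Ne.symm h4]
  have n5 : ("WP_HOME" == k) = false := by simp [Ne.symm h5]
  have n6 : ("WP_SITEURL" == k) = false := by simp [Ne.symm h6]
  have n7 : ("WP_ENV" == k) = false := by simp [Ne.symm h7]
  have n8 : ("TABLE_PREFIX" == k) = false := by simp [Ne.symm h8]
  simp [pvKeyMappingA_eq, PySem.Dict.get?, List.find?, n1, n2, n3, n4, n5, n6, n7, n8, h1, h2, h3, h4, h5, h6, h7, h8]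

theorem pv_main (lines : List String) (a1 a2 a3 a4 a5 a6 a7 a8 : Option String) :
    (lines.foldl pvStepA (pvMk a1 a2 a3 a4 a5 a6 a7 a8)).items =
      (let parsed := lines.filterMap pvParseLineB
      [("db_name", pvLastB parsed "DB_NAME" a1),
       ("db_user", pvLastB parsed "DB_USER" a2),
       ("db_password", pvLastB parsed "DB_PASSWORD" a3),
       ("db_host", pvLastB parsed "DB_HOST" a4),
       ("wp_home", pvLastB parsed "WP_HOME" a5),
       ("wp_siteurl", pvLastB parsed "WP_SITEURL" a6),
       ("wp_env", pvLastB parsed "WP_ENV" a7),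
       ("table_prefix", pvLastB parsed "TABLE_PREFIX" a8)]) := by
  induction lines generalizing a1 a2 a3 a4 a5 a6 a7 a8 with
  | nil => simp [pvLastB, pvMk]
  | cons l ls ih =>
    cases h : pvParseLineB l with
    | none =>
      simp only [List.foldl_cons, List.filterMap_cons, h, pvStepA_of_parse_none _ l h]
      exact ih a1 a2 a3 a4 a5 a6 a7 a8
    | some kv =>
      obtain ⟨k, v⟩ := kv
      simp only [List.foldl_cons, List.filterMap_cons, h,
        pvStepA_mk a1 a2 a3 a4 a5 a6 a7 a8 l k v h]
      rw [ih]
      simp only [pvLastB_cons]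

-- ===== VERDICT (by name: the statement is the Claim_ definition above) =====
theorem parse_bedrock_env_spec : Claim_equal_parse_bedrock_env := by
  intro env _
  unfold Spec_parse_bedrock_env parse_bedrock_env parse_bedrock_env_alt
  exact pv_main _ none none none (some "localhost") none none (some "production") (some "wp_")
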